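-- pv_equiv track=rewrite | github.com/teejayjan/CS325 | Palindrome.py | pal_permutations
-- ===== SOURCE A (Python) =====
-- def pal_permutations(permutations, string):
--     """Takes a string and returns a list of substrings with one of each character removed from the passed string."""
--     for i in range(len(string)):
--         temp = []
--         for j in range(len(string)):
--             if i != j:
--                 temp.append(string[j])
--         permutations.append(temp)
--     return permutations
-- ===== SOURCE B (Python) =====
-- def pal_permutations(permutations, string):
--     """Takes a string and returns a list of substrings with one of each character removed from the passed string."""
--     for i in range(len(string)):
--         permutations.append(list(string[:i] + string[i + 1:]))
--     return permutations
-- ===== Notes on version B (the rewrite author's own statement) =====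
-- stated objective: simpler
-- what changed: Each row is built as prefix-slice + suffix-slice (string[:i] + string[i+1:]) converted with list(), instead of an inner index loop that scans every j and skips j == i.
import Mathlib
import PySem

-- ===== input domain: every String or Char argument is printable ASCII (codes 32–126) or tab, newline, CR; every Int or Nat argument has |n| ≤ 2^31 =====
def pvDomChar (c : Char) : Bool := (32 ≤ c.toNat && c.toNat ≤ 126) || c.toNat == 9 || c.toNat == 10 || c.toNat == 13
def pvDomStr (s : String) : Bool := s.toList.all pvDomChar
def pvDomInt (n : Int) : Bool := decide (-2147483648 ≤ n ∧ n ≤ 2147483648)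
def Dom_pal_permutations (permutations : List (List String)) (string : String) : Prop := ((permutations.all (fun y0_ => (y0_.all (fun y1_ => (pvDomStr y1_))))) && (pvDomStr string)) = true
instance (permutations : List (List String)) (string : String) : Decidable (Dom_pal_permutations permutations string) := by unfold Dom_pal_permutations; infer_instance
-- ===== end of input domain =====

-- B builds each row by slice concatenation string[:i] + string[i+1:] instead of A's inner
-- skip-one index loop (objective: simpler). Both A and B append to and return the passed-in
-- `permutations` list; the Python versions mutate it in place identically, the proof is about
-- the return value.

-- ===== PORT A =====
-- inner loop reads string[j] with j ∈ range(len(string)), always in range, so pyGetD is exact here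
def pal_permutations (permutations : List (List String)) (string : String) : List (List String) :=
  (PySem.List.pyRange 0 (PySem.Str.len string) 1).foldl (fun perms i =>
    let temp := (PySem.List.pyRange 0 (PySem.Str.len string) 1).foldl (fun temp j =>
      if i ≠ j then temp ++ [String.ofList [PySem.List.pyGetD string.toList j ' ']] else temp)
      ([] : List String)
    perms ++ [temp]) permutations

-- ===== PORT B =====
-- list(string[:i] + string[i+1:]) — list() of a str concatenation is the concatenation of the
-- char lists (exact), each char becoming a one-char string
def pal_permutations_alt (permutations : List (List String)) (string : String) : List (List String) :=
  (PySem.List.pyRange 0 (PySem.Str.len string) 1).foldl (fun perms i =>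
    perms ++ [((PySem.Str.slice string none (some i)).toList
               ++ (PySem.Str.slice string (some (i + 1)) none).toList).map
              (fun c => String.ofList [c])]) permutations

-- ===== PRECONDITION & SPEC =====
def Spec_pal_permutations (permutations : List (List String)) (string : String) (out : List (List String)) : Prop := out = pal_permutations_alt permutations string
instance (permutations : List (List String)) (string : String) (out : List (List String)) : Decidable (Spec_pal_permutations permutations string out) := by unfold Spec_pal_permutations; infer_instance

-- ===== CLAIM (what is proved, stated in full; the proofs are below) =====
def Claim_equal_pal_permutations : Prop := ∀ (permutations : List (List String)) (string : String), Dom_pal_permutations permutations string → Spec_pal_permutations permutations string (pal_permutations permutations string)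

-- ===== LEMMAS AND PROOFS =====

-- the prefix part: indices 0..i-1 read through pyGetD are exactly take i
lemma map_pyGetD_pyRange_take (cs : List Char) (i : Int) (h0 : 0 ≤ i) (hn : i ≤ (cs.length : Int)) :
    (PySem.List.pyRange 0 i 1).map (fun j => PySem.List.pyGetD cs j ' ') = cs.take i.toNat := by
  apply List.ext_getElem
  · rw [List.length_map, PySem.List.length_pyRange_one, List.length_take]
    omega
  · intro k h1 h2
    simp only [List.getElem_map, PySem.List.getElem_pyRange_one, List.getElem_take]
    rw [PySem.List.pyGetD_eq_getElem]
    · simp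
    · omega
    · rw [List.length_map, PySem.List.length_pyRange_one] at h1
      omega

-- A's inner skip-one loop over range(len cs) equals B's take/drop row
lemma row_eq (cs : List Char) (i : Int) (h0 : 0 ≤ i) (hn : i < (cs.length : Int)) :
    (PySem.List.pyRange 0 (cs.length : Int) 1).foldl (fun t j =>
        if i ≠ j then t ++ [String.ofList [PySem.List.pyGetD cs j ' ']] else t) [] =
    (cs.take i.toNat ++ cs.drop (i.toNat + 1)).map (fun c => String.ofList [c]) := by
  rw [PySem.List.foldl_append_ite]
  rw [PySem.List.pyRange_one_append 0 i (cs.length : Int) h0 (le_of_lt hn),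
      PySem.List.pyRange_one_cons hn]
  rw [List.filter_append, List.filter_cons_of_neg (by simp)]
  have hpre : (PySem.List.pyRange 0 i 1).filter (fun j => decide (i ≠ j)) =
      PySem.List.pyRange 0 i 1 := by
    apply List.filter_eq_self.mpr
    intro j hj
    rw [PySem.List.mem_pyRange_one] at hj
    simp; omega
  have hsuf : (PySem.List.pyRange (i + 1) (cs.length : Int) 1).filter (fun j => decide (i ≠ j)) =
      PySem.List.pyRange (i + 1) (cs.length : Int) 1 := by
    apply List.filter_eq_self.mpr
    intro j hj
    rw [PySem.List.mem_pyRange_one] at hj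
    simp; omega
  rw [hpre, hsuf]
  rw [List.map_append]
  have hA : (PySem.List.pyRange 0 i 1).map
      (fun j => String.ofList [PySem.List.pyGetD cs j ' ']) = (cs.take i.toNat).map (fun c => String.ofList [c]) := by
    rw [← map_pyGetD_pyRange_take cs i h0 (le_of_lt hn), List.map_map]
    rfl
  have hB : (PySem.List.pyRange (i + 1) (cs.length : Int) 1).map
      (fun j => String.ofList [PySem.List.pyGetD cs j ' ']) = (cs.drop (i.toNat + 1)).map (fun c => String.ofList [c]) := by
    have := PySem.List.map_pyGetD_pyRange' (a := i + 1) cs ' ' (by omega)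
    rw [show ((fun j => String.ofList [PySem.List.pyGetD cs j ' ']) =
        (fun c => String.ofList [c]) ∘ (fun j => PySem.List.pyGetD cs j ' ')) from rfl,
      ← List.map_map, this, show (i + 1).toNat = i.toNat + 1 from by omega]
  rw [hA, hB, List.map_append, List.nil_append]

-- ===== VERDICT (by name: the statement is the Claim_ definition above) =====
theorem pal_permutations_spec : Claim_equal_pal_permutations := by
  intro perms s _
  unfold Spec_pal_permutations pal_permutations pal_permutations_alt
  rw [PySem.List.foldl_append_singleton_eq_map, PySem.List.foldl_append_singleton_eq_map]
  congr 1
  apply List.map_congr_left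
  intro i hi
  rw [PySem.List.mem_pyRange_one] at hi
  simp only [PySem.Str.len_eq] at hi
  obtain ⟨h0, hn⟩ := hi
  have hlen : PySem.Str.len s = (s.toList.length : Int) := by simp
  rw [hlen, row_eq s.toList i h0 hn]
  congr 2
  · rw [PySem.Str.toList_slice]
    simp [PySem.List.slice_to _ h0]
  · rw [PySem.Str.toList_slice, PySem.Chars.slice_eq_listSlice]
    rw [PySem.List.slice_from _ (by omega : (0:Int) ≤ i + 1)]
    congr 1
    omega
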